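-- pv_equiv track=rewrite | github.com/kevinw/jai-imgui | generate_jai_wrapper.py | handle_pointers
-- ===== SOURCE A (Python) =====
-- def handle_pointers(t):
--     # turn void** c-style pointer declarations into jai-style **void
--
--     output_t = ""
--     while True:
--         t = t.strip()
--         if t.endswith("*") or t.endswith("&"):
--             output_t += "*"
--             t = t[:-1]
--         elif t.endswith("[]"):
--             output_t += "[]"
--             t = t[:-2]
--         else:
--             output_t += t
--             break
--
--     return output_t
-- ===== SOURCE B (Python) =====
-- def handle_pointers(t):
--     # Single backward scan over the stripped string: collect the trailing
--     # run of */&/[] tokens (with whitespace between them) in one pass,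
--     # then emit the tokens (rightmost first) followed by the base.
--     s = t.strip()
--     out = []
--     i = len(s) - 1
--     while i >= 0:
--         c = s[i]
--         if c == "*" or c == "&":
--             out.append("*")
--             i -= 1
--         elif c == "]" and i > 0 and s[i - 1] == "[":
--             out.append("[]")
--             i -= 2
--         elif c.isspace():
--             i -= 1
--         else:
--             break
--     return "".join(out) + s[: i + 1]
-- ===== Notes on version B (the rewrite author's own statement) =====
-- stated objective: alternative
-- what changed: B replaces A's peel-one-token-and-restrip loop (repeated strip + endswith + slicing, re-copying the string each iteration) by a single backward index scan over the once-stripped string that collects the whole trailing token run in one pass and joins it with the untouched base prefix.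
import Mathlib
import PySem

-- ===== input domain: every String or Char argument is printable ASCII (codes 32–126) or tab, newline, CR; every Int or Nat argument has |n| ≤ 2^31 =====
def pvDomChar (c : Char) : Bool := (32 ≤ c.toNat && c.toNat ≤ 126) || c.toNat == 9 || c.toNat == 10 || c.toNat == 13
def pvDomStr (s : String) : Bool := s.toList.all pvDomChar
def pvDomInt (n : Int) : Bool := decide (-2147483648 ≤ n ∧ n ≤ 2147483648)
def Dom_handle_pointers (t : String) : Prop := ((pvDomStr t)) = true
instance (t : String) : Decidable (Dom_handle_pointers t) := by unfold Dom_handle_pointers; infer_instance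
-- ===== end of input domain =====

-- B replaces A's peel-one-token-and-restrip loop by a single backward scan over
-- the once-stripped string (alternative decomposition; same return value).

-- ===== PORT A =====
-- termination helpers for A's while loop (the string strictly shrinks each iteration)
lemma pvStripLenLe (t : List Char) : (PySem.Chars.strip t).length ≤ t.length := by
  simp only [PySem.Chars.strip, PySem.Chars.lstrip, PySem.Chars.rstrip, List.length_reverse]
  calc (List.dropWhile PySem.Chars.isspace (List.dropWhile PySem.Chars.isspace t).reverse).length
      ≤ (List.dropWhile PySem.Chars.isspace t).reverse.length := List.length_dropWhile_le _ _
    _ = (List.dropWhile PySem.Chars.isspace t).length := List.length_reverse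
    _ ≤ t.length := List.length_dropWhile_le _ _

lemma pvEndswithNe (s p : List Char) (hp : p ≠ []) (h : PySem.Chars.endswith s p = true) :
    s ≠ [] := by
  obtain ⟨u, hu⟩ := (PySem.Chars.endswith_iff s p).mp h
  intro hc
  rw [hc] at hu
  exact hp (List.append_eq_nil_iff.mp hu).2

lemma pvSliceNegTwo (l : List Char) :
    PySem.List.slice l none (some (-2)) = l.dropLast.dropLast := by
  simp only [PySem.List.slice, PySem.List.clampIdx]
  rw [List.dropLast_eq_take, List.dropLast_eq_take, List.take_take, List.length_take]
  congr 1
  split_ifs with h <;> omega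

-- literal port of A's while loop: strip, peel one trailing token per iteration
def aGo (out : List Char) (t : List Char) : List Char :=
  if h1 : (PySem.Chars.endswith (PySem.Chars.strip t) ['*']
        || PySem.Chars.endswith (PySem.Chars.strip t) ['&']) = true then
    aGo (out ++ ['*']) (PySem.List.slice (PySem.Chars.strip t) none (some (-1)))
  else if h2 : PySem.Chars.endswith (PySem.Chars.strip t) ['[', ']'] = true then
    aGo (out ++ ['[', ']']) (PySem.List.slice (PySem.Chars.strip t) none (some (-2)))
  else out ++ PySem.Chars.strip t
termination_by t.length
decreasing_by
  · have hne : PySem.Chars.strip t ≠ [] := by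
      cases hx : PySem.Chars.endswith (PySem.Chars.strip t) ['*'] with
      | true => exact pvEndswithNe _ _ (by simp) hx
      | false =>
        rw [hx, Bool.false_or] at h1
        exact pvEndswithNe _ _ (by simp) h1
    have hle := pvStripLenLe t
    have hlen : (PySem.Chars.strip t).length ≠ 0 := by simpa using hne
    rw [PySem.List.slice_to_neg_one]
    simp only [List.length_dropLast]
    omega
  · have hne : PySem.Chars.strip t ≠ [] := pvEndswithNe _ _ (by simp) h2
    have hle := pvStripLenLe t
    have hlen : (PySem.Chars.strip t).length ≠ 0 := by simpa using hne
    rw [pvSliceNegTwo]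
    simp only [List.length_dropLast]
    omega

def handle_pointers (t : String) : String := String.ofList (aGo [] t.toList)

-- ===== PORT B =====
-- literal port of B: the backward index scan over the stripped string is the
-- recursion over its reversed character list; `rest.head? = some '['` is
-- Source B's `i > 0 and s[i-1] == "["`, `rest.tail` is `i -= 2`.
def altGo (acc : List Char) : List Char → List Char
  | [] => acc
  | c :: rest =>
    if c = '*' ∨ c = '&' then altGo (acc ++ ['*']) rest
    else if c = ']' ∧ rest.head? = some '[' then altGo (acc ++ ['[', ']']) rest.tail
    else if PySem.Chars.isspace c then altGo acc rest
    else acc ++ (c :: rest).reverse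
termination_by l => l.length
decreasing_by
  · simp
  · simp only [List.length_cons]
    have := List.length_tail (l := rest)
    omega
  · simp

def handle_pointers_alt (t : String) : String :=
  String.ofList (altGo [] (PySem.Chars.strip t.toList).reverse)

-- ===== PRECONDITION & SPEC =====
def Spec_handle_pointers (t : String) (out : String) : Prop := out = handle_pointers_alt t
instance (t : String) (out : String) : Decidable (Spec_handle_pointers t out) := by unfold Spec_handle_pointers; infer_instance

-- ===== CLAIM (what is proved, stated in full; the proofs are below) =====
def Claim_equal_handle_pointers : Prop := ∀ (t : String), Dom_handle_pointers t → Spec_handle_pointers t (handle_pointers t)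

-- ===== LEMMAS AND PROOFS =====

lemma pvDwIdem (p : Char → Bool) (l : List Char) :
    List.dropWhile p (List.dropWhile p l) = List.dropWhile p l := by
  induction l with
  | nil => rfl
  | cons c rest ih => by_cases h : p c <;> simp [h, ih]

lemma pvDwConsFalse (p : Char → Bool) (c : Char) (r : List Char)
    (h : List.dropWhile p (c :: r) = c :: r) : p c = false := by
  by_cases hp : p c
  · rw [List.dropWhile_cons_of_pos hp] at h
    have h1 := List.length_dropWhile_le p r
    have h2 := congrArg List.length h
    simp at h2
    omega
  · simpa using hp

-- prefixes of a left-stripped list are left-stripped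
lemma pvDwPrefixFix (p : Char → Bool) (l u : List Char)
    (hl : List.dropWhile p l = l) (hu : u <+: l) : List.dropWhile p u = u := by
  cases u with
  | nil => rfl
  | cons a u' =>
    cases l with
    | nil => simp at hu
    | cons b l' =>
      obtain ⟨w, hw⟩ := hu
      have hab : a = b := by
        have := congrArg (List.head? ·) hw
        simpa using this
      have hpb : p b = false := pvDwConsFalse p b l' hl
      rw [List.dropWhile_cons_of_neg (by rw [hab, hpb]; simp)]

-- the accumulator pulls out of altGo
lemma pvAltGoAccAux (n : Nat) : ∀ (l : List Char), l.length ≤ n → ∀ acc,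
    altGo acc l = acc ++ altGo [] l := by
  induction n with
  | zero =>
    intro l h acc
    have : l = [] := List.eq_nil_of_length_eq_zero (Nat.le_zero.mp h)
    subst this
    simp [altGo]
  | succ n ih =>
    intro l hl acc
    cases l with
    | nil => simp [altGo]
    | cons c rest =>
      have hr : rest.length ≤ n := by simp at hl; omega
      rw [altGo, altGo]
      by_cases h1 : c = '*' ∨ c = '&'
      · simp only [if_pos h1]
        rw [ih rest hr (acc ++ ['*']), ih rest hr ([] ++ ['*'])]
        simp
      · simp only [if_neg h1]
        by_cases h2 : c = ']' ∧ rest.head? = some '['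
        · simp only [if_pos h2]
          have ht : rest.tail.length ≤ n := by
            have := List.length_tail (l := rest)
            omega
          rw [ih rest.tail ht (acc ++ ['[', ']']), ih rest.tail ht ([] ++ ['[', ']'])]
          simp
        · simp only [if_neg h2]
          by_cases h3 : PySem.Chars.isspace c
          · simp only [if_pos h3]
            exact ih rest hr acc
          · simp only [if_neg h3]
            simp

lemma pvAltGoAcc (acc l : List Char) : altGo acc l = acc ++ altGo [] l :=
  pvAltGoAccAux l.length l le_rfl acc

-- altGo skips a leading whitespace run
lemma pvAltGoDropWhile (acc : List Char) (l : List Char) :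
    altGo acc (List.dropWhile PySem.Chars.isspace l) = altGo acc l := by
  induction l with
  | nil => rfl
  | cons c rest ih =>
    by_cases hsp : PySem.Chars.isspace c
    · have hc1 : ¬(c = '*' ∨ c = '&') := by
        rintro (rfl | rfl) <;> exact absurd hsp (by decide)
      have hc2 : ¬(c = ']' ∧ rest.head? = some '[') := by
        rintro ⟨rfl, -⟩; exact absurd hsp (by decide)
      rw [List.dropWhile_cons_of_pos hsp, ih, altGo]
      simp only [if_neg hc1, if_neg hc2, if_pos hsp]
    · rw [List.dropWhile_cons_of_neg (by simpa using hsp)]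

-- left-stripped-ness of strip t and its pieces
lemma pvStripLFix (t : List Char) :
    List.dropWhile PySem.Chars.isspace (PySem.Chars.strip t) = PySem.Chars.strip t := by
  have hlfix : List.dropWhile PySem.Chars.isspace (PySem.Chars.lstrip t)
      = PySem.Chars.lstrip t := by
    simp only [PySem.Chars.lstrip]
    exact pvDwIdem _ _
  have hpref : PySem.Chars.strip t <+: PySem.Chars.lstrip t := by
    simp only [PySem.Chars.strip, PySem.Chars.rstrip]
    have h := List.reverse_prefix.mpr
      (List.dropWhile_suffix (l := (PySem.Chars.lstrip t).reverse) PySem.Chars.isspace)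
    simpa using h
  exact pvDwPrefixFix _ _ _ hlfix hpref

lemma pvStripRevFix (t : List Char) :
    List.dropWhile PySem.Chars.isspace (PySem.Chars.strip t).reverse
      = (PySem.Chars.strip t).reverse := by
  simp only [PySem.Chars.strip, PySem.Chars.rstrip, List.reverse_reverse]
  exact pvDwIdem _ _

-- strip of a left-stripped prefix reduces to its reversed dropWhile
lemma pvAltGoStripPrefix (t u w : List Char) (hu : u ++ w = PySem.Chars.strip t) :
    altGo [] (PySem.Chars.strip u).reverse = altGo [] u.reverse := by
  have hufix : List.dropWhile PySem.Chars.isspace u = u :=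
    pvDwPrefixFix _ _ _ (pvStripLFix t) ⟨w, hu⟩
  have hs : (PySem.Chars.strip u).reverse
      = List.dropWhile PySem.Chars.isspace u.reverse := by
    simp [PySem.Chars.strip, PySem.Chars.lstrip, PySem.Chars.rstrip, hufix]
  rw [hs, pvAltGoDropWhile]

lemma pvKey (n : Nat) : ∀ (t out : List Char), t.length ≤ n →
    aGo out t = out ++ altGo [] (PySem.Chars.strip t).reverse := by
  induction n with
  | zero =>
    intro t out h
    have : t = [] := List.eq_nil_of_length_eq_zero (Nat.le_zero.mp h)
    subst this
    rw [aGo, dif_neg (by decide), dif_neg (by decide)]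
    simp [show PySem.Chars.strip ([] : List Char) = [] from rfl, altGo]
  | succ n ih =>
    intro t out h
    rw [aGo]
    by_cases h1 : (PySem.Chars.endswith (PySem.Chars.strip t) ['*']
        || PySem.Chars.endswith (PySem.Chars.strip t) ['&']) = true
    · rw [dif_pos h1]
      have hcu : ∃ c u, (c = '*' ∨ c = '&') ∧ u ++ [c] = PySem.Chars.strip t := by
        cases hx : PySem.Chars.endswith (PySem.Chars.strip t) ['*'] with
        | true =>
          obtain ⟨u, hu⟩ := (PySem.Chars.endswith_iff _ _).mp hx
          exact ⟨'*', u, Or.inl rfl, hu⟩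
        | false =>
          rw [hx, Bool.false_or] at h1
          obtain ⟨u, hu⟩ := (PySem.Chars.endswith_iff _ _).mp h1
          exact ⟨'&', u, Or.inr rfl, hu⟩
      obtain ⟨c, u, hc, hu⟩ := hcu
      have hslice : PySem.List.slice (PySem.Chars.strip t) none (some (-1)) = u := by
        rw [PySem.List.slice_to_neg_one, ← hu, List.dropLast_concat]
      have hlen : u.length ≤ n := by
        have h1 := pvStripLenLe t
        have h2 : (PySem.Chars.strip t).length = u.length + 1 := by
          rw [← hu]; simp
        omega
      have hsrev : (PySem.Chars.strip t).reverse = c :: u.reverse := by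
        rw [← hu]; simp
      have hstep : altGo [] ((PySem.Chars.strip t).reverse)
          = '*' :: altGo [] u.reverse := by
        rw [hsrev, altGo]
        simp only [if_pos hc]
        rw [pvAltGoAcc]
        simp
      rw [hslice, ih u (out ++ ['*']) hlen, pvAltGoStripPrefix t u [c] hu, hstep]
      simp
    · rw [dif_neg h1]
      by_cases h2 : PySem.Chars.endswith (PySem.Chars.strip t) ['[', ']'] = true
      · rw [dif_pos h2]
        obtain ⟨u, hu⟩ := (PySem.Chars.endswith_iff _ _).mp h2
        have hslice : PySem.List.slice (PySem.Chars.strip t) none (some (-2)) = u := by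
          rw [pvSliceNegTwo, ← hu,
            show u ++ ['[', ']'] = (u ++ ['[']) ++ [']'] by simp,
            List.dropLast_concat, List.dropLast_concat]
        have hlen : u.length ≤ n := by
          have hl1 := pvStripLenLe t
          have hl2 : (PySem.Chars.strip t).length = u.length + 2 := by
            rw [← hu]; simp
          omega
        have hsrev : (PySem.Chars.strip t).reverse = ']' :: '[' :: u.reverse := by
          rw [← hu]; simp
        have hstep : altGo [] ((PySem.Chars.strip t).reverse)
            = '[' :: ']' :: altGo [] u.reverse := by
          rw [hsrev, altGo]
          simp only [if_neg (show ¬(']' = '*' ∨ ']' = '&') by decide)]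
          rw [show ('[' :: u.reverse).tail = u.reverse from rfl, pvAltGoAcc]
          simp
        rw [hslice, ih u (out ++ ['[', ']']) hlen,
          pvAltGoStripPrefix t u ['[', ']'] hu, hstep]
        simp
      · rw [dif_neg h2]
        cases hrev : (PySem.Chars.strip t).reverse with
        | nil =>
          have hs0 : PySem.Chars.strip t = [] := by
            simpa using congrArg List.reverse hrev
          simp [hs0, altGo]
        | cons c r =>
          have hs : PySem.Chars.strip t = r.reverse ++ [c] := by
            have := congrArg List.reverse hrev
            simpa using this
          have hspc : PySem.Chars.isspace c = false := by
            have := pvStripRevFix t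
            rw [hrev] at this
            exact pvDwConsFalse _ _ _ this
          have hc1 : ¬(c = '*' ∨ c = '&') := by
            rintro (rfl | rfl)
            · exact h1 (by
                rw [(PySem.Chars.endswith_iff (PySem.Chars.strip t) ['*']).mpr
                  ⟨r.reverse, hs.symm⟩]
                simp)
            · exact h1 (by
                rw [(PySem.Chars.endswith_iff (PySem.Chars.strip t) ['&']).mpr
                  ⟨r.reverse, hs.symm⟩]
                simp)
          have hc2 : ¬(c = ']' ∧ r.head? = some '[') := by
            rintro ⟨rfl, hh⟩
            cases r with
            | nil => simp at hh
            | cons d r' =>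
              have hd : d = '[' := by simpa using hh
              subst hd
              exact h2 ((PySem.Chars.endswith_iff _ _).mpr
                ⟨r'.reverse, by simp [hs]⟩)
          rw [altGo]
          simp only [if_neg hc1, if_neg hc2,
            if_neg (show ¬(PySem.Chars.isspace c = true) by simp [hspc])]
          simp [hs]

-- ===== VERDICT (by name: the statement is the Claim_ definition above) =====
theorem handle_pointers_spec : Claim_equal_handle_pointers := by
  intro t _
  unfold Spec_handle_pointers handle_pointers handle_pointers_alt
  rw [pvKey t.toList.length t.toList [] le_rfl]
  simp
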